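-- pv_equiv track=rewrite | github.com/JakubWorek/algorithms_and_data_structures_course | 2019-2020/KOLOKWIA/kolokwium_1/zad3.py | check_sums
-- ===== SOURCE A (Python) =====
-- def is_sum_of_two(A, idx):
--     l = 0
--     r = len(A) - 1
--
--     while l < r:
--         if l == idx: l+=1; continue
--         if r == idx: r-=1; continue
--
--         if A[l] + A[r] > A[idx]: r -=1
--         elif A[l] + A[r] < A[idx]: l +=1
--         else: return True
--
--     return False
--
-- def check_sums(A):
--     n = len(A)
--     if n < 3: return False
--     A.sort()
--
--     if not is_sum_of_two(A,0): return False
--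
--     for i in range(1,n):
--         if A[i] != A[i-1] and not is_sum_of_two(A,i): return False
--
--     return True
-- ===== SOURCE B (Python) =====
-- def check_sums(A):
--     if len(A) < 3:
--         return False
--     A.sort()
--     cnt = {}
--     for x in A:
--         cnt[x] = cnt.get(x, 0) + 1
--     n = len(A)
--     for i in range(n):
--         if i > 0 and A[i] == A[i - 1]:
--             continue
--         v = A[i]
--         ok = False
--         for j in range(n):
--             if j == i:
--                 continue
--             need = v - A[j]
--             avail = cnt.get(need, 0)
--             if A[j] == need:
--                 avail -= 1
--             if v == need:
--                 avail -= 1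
--             if avail >= 1:
--                 ok = True
--                 break
--         if not ok:
--             return False
--     return True
-- ===== Notes on version B (the rewrite author's own statement) =====
-- stated objective: alternative
-- what changed: Replaces the converging two-pointer search per distinct value with a hash-complement 2SUM scan: a value->count dictionary is built once, and for each candidate summand j the second summand is tested by an adjusted count lookup instead of pointer convergence.
import Mathlib
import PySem

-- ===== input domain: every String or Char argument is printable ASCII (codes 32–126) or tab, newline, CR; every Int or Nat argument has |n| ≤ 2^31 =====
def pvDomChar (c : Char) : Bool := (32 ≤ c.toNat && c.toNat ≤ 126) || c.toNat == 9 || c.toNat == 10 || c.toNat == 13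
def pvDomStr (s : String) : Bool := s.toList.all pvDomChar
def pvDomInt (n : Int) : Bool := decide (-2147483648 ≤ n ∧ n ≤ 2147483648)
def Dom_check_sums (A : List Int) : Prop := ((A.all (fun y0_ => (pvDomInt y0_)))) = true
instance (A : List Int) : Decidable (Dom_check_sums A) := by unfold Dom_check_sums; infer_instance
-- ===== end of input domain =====

-- B replaces the converging two-pointer search per distinct value by a hash-complement 2SUM scan
-- over a value-count dictionary built once (objective: alternative).  Both A and B sort the list
-- in place; the equivalence proved here is about the return value (the mutation is identical).

-- ===== PORT A =====
-- In these loops every Python index is a nonnegative int within range (0 ≤ l < r ≤ n-1,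
-- 0 ≤ idx < n, 1 ≤ i < n), so List.getD is exact for Python's A[...] here.
def isSumAux (S : List Int) (idx l r : Nat) : Bool :=
  if l < r then
    if l = idx then isSumAux S idx (l+1) r
    else if r = idx then isSumAux S idx l (r-1)
    else if S.getD l 0 + S.getD r 0 > S.getD idx 0 then isSumAux S idx l (r-1)
    else if S.getD l 0 + S.getD r 0 < S.getD idx 0 then isSumAux S idx (l+1) r
    else true
  else false
termination_by r - l
decreasing_by all_goals omega

def is_sum_of_two (S : List Int) (idx : Nat) : Bool :=
  isSumAux S idx 0 (S.length - 1)

def checkLoopA (S : List Int) (i n : Nat) : Bool :=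
  if i < n then
    if S.getD i 0 ≠ S.getD (i-1) 0 ∧ ¬ (is_sum_of_two S i = true) then false
    else checkLoopA S (i+1) n
  else true
termination_by n - i
decreasing_by omega

def check_sums (A : List Int) : Bool :=
  let n := A.length
  if n < 3 then false
  else
    let S := PySem.List.sorted A (fun x => x) false
    if ¬ (is_sum_of_two S 0 = true) then false
    else checkLoopA S 1 n

-- ===== PORT B =====
def bInner (S : List Int) (cnt : PySem.Dict Int Int) (i : Nat) (v : Int) (j n : Nat) : Bool :=
  if j < n then
    if j = i then bInner S cnt i v (j+1) n
    else
      let need := v - S.getD j 0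
      let avail := cnt.getD need 0 - (if S.getD j 0 = need then 1 else 0)
                     - (if v = need then 1 else 0)
      if 1 ≤ avail then true else bInner S cnt i v (j+1) n
  else false
termination_by n - j
decreasing_by all_goals omega

def bOuter (S : List Int) (cnt : PySem.Dict Int Int) (i n : Nat) : Bool :=
  if i < n then
    if 0 < i ∧ S.getD i 0 = S.getD (i-1) 0 then bOuter S cnt (i+1) n
    else if bInner S cnt i (S.getD i 0) 0 n then bOuter S cnt (i+1) n
    else false
  else true
termination_by n - i
decreasing_by all_goals omega

def check_sums_alt (A : List Int) : Bool :=
  if A.length < 3 then false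
  else
    let S := PySem.List.sorted A (fun x => x) false
    let cnt := S.foldl (fun d x => d.insert x (d.getD x 0 + 1)) PySem.Dict.empty
    bOuter S cnt 0 S.length

-- ===== PRECONDITION & SPEC =====
def Spec_check_sums (A : List Int) (out : Bool) : Prop := out = check_sums_alt A
instance (A : List Int) (out : Bool) : Decidable (Spec_check_sums A out) := by unfold Spec_check_sums; infer_instance

-- ===== CLAIM (what is proved, stated in full; the proofs are below) =====
def Claim_equal_check_sums : Prop := ∀ (A : List Int), Dom_check_sums A → Spec_check_sums A (check_sums A)

-- ===== LEMMAS AND PROOFS =====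

-- "value at index i is the sum of the values at two other indices"
def pairEx (S : List Int) (i : Nat) : Prop :=
  ∃ j k : Nat, j < k ∧ k < S.length ∧ j ≠ i ∧ k ≠ i ∧ S.getD j 0 + S.getD k 0 = S.getD i 0

lemma getD_mono (S : List Int) (hs : List.Pairwise (· ≤ ·) S) :
    ∀ p q : Nat, p ≤ q → q < S.length → S.getD p 0 ≤ S.getD q 0 := by
  intro p q hpq hq
  rcases Nat.eq_or_lt_of_le hpq with h | h
  · subst h; exact le_refl _
  · rw [List.getD_eq_getElem _ _ (by omega), List.getD_eq_getElem _ _ hq]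
    exact List.pairwise_iff_getElem.mp hs p q (by omega) hq h

lemma count_eq_countP (S : List Int) (x : Int) :
    S.count x = List.countP (fun k => decide (S.getD k 0 = x)) (List.range S.length) := by
  induction S with
  | nil => simp
  | cons a S ih =>
    rw [List.length_cons, List.range_succ_eq_map, List.countP_cons, List.countP_map]
    have hcomp : ((fun k => decide ((a :: S).getD k 0 = x)) ∘ Nat.succ)
        = fun k => decide (S.getD k 0 = x) := by
      funext k
      simp only [Function.comp_apply, List.getD_cons_succ]
    rw [hcomp, ← ih, List.count_cons, List.getD_cons_zero]
    by_cases h : a = x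
    · simp [h]
    · simp [h]

lemma countP_range_card (p : Nat → Prop) [DecidablePred p] (n : Nat) :
    List.countP (fun k => decide (p k)) (List.range n) = ((Finset.range n).filter p).card := by
  rw [List.countP_eq_length_filter]
  have h1 : (Finset.range n).filter p = ((List.range n).filter (fun k => decide (p k))).toFinset := by
    ext k
    simp
  rw [h1, List.toFinset_card_of_nodup ((List.nodup_range).filter _)]

lemma avail_iff (S : List Int) (need : Int) (i j : Nat)
    (hi : i < S.length) (hj : j < S.length) (hij : j ≠ i) :
    (1 ≤ (S.count need : Int) - (if S.getD j 0 = need then 1 else 0)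
            - (if S.getD i 0 = need then 1 else 0)) ↔
    ∃ k : Nat, k < S.length ∧ k ≠ i ∧ k ≠ j ∧ S.getD k 0 = need := by
  classical
  set T : Finset Nat := (Finset.range S.length).filter (fun k => S.getD k 0 = need) with hT
  have hcard : S.count need = T.card := by
    rw [count_eq_countP, countP_range_card]
  have hiT : S.getD i 0 = need ↔ i ∈ T := by simp [hT, hi]
  have hjT : S.getD j 0 = need ↔ j ∈ T := by simp [hT, hj]
  have hE : ∀ k, k ∈ (T.erase i).erase j ↔ (k < S.length ∧ k ≠ i ∧ k ≠ j ∧ S.getD k 0 = need) := by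
    intro k
    simp only [Finset.mem_erase, hT, Finset.mem_filter, Finset.mem_range]
    tauto
  have hcardE : (((T.erase i).erase j).card : Int)
      = (T.card : Int) - (if i ∈ T then 1 else 0) - (if j ∈ T then 1 else 0) := by
    by_cases h1 : i ∈ T
    · have c1 := Finset.card_erase_of_mem h1
      by_cases h2 : j ∈ T
      · have h2' : j ∈ T.erase i := Finset.mem_erase.mpr ⟨hij, h2⟩
        have c2 := Finset.card_erase_of_mem h2'
        have b1 : 1 ≤ T.card := Finset.card_pos.mpr ⟨i, h1⟩
        have b2 : 1 ≤ (T.erase i).card := Finset.card_pos.mpr ⟨j, h2'⟩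
        rw [if_pos h1, if_pos h2, c2, c1]
        omega
      · have h2' : j ∉ T.erase i := fun h => h2 (Finset.mem_erase.mp h).2
        rw [Finset.erase_eq_of_notMem h2']
        have b1 : 1 ≤ T.card := Finset.card_pos.mpr ⟨i, h1⟩
        rw [if_pos h1, if_neg h2, c1]
        omega
    · rw [Finset.erase_eq_of_notMem h1]
      by_cases h2 : j ∈ T
      · have c2 := Finset.card_erase_of_mem h2
        have b1 : 1 ≤ T.card := Finset.card_pos.mpr ⟨j, h2⟩
        rw [if_neg h1, if_pos h2, c2]
        omega
      · rw [Finset.erase_eq_of_notMem h2]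
        rw [if_neg h1, if_neg h2]
        omega
  have key : (1 ≤ (S.count need : Int) - (if j ∈ T then 1 else 0) - (if i ∈ T then 1 else 0)) ↔
      ((T.erase i).erase j).Nonempty := by
    rw [← Finset.card_pos, hcard]
    split_ifs at hcardE ⊢ <;> omega
  simp only [hiT, hjT]
  rw [key, Finset.Nonempty]
  exact exists_congr hE

lemma aux_iff (S : List Int) (mono : ∀ p q : Nat, p ≤ q → q < S.length → S.getD p 0 ≤ S.getD q 0)
    (idx l r : Nat) :
    r < S.length →
    (isSumAux S idx l r = true ↔
      ∃ j k : Nat, l ≤ j ∧ j < k ∧ k ≤ r ∧ j ≠ idx ∧ k ≠ idx ∧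
        S.getD j 0 + S.getD k 0 = S.getD idx 0) := by
  fun_induction isSumAux S idx l r with
  | case1 r hlr ih =>
    intro hr
    rw [ih hr]
    constructor
    · rintro ⟨j, k, h1, h2, h3, h4, h5, h6⟩; exact ⟨j, k, by omega, h2, h3, h4, h5, h6⟩
    · rintro ⟨j, k, h1, h2, h3, h4, h5, h6⟩; exact ⟨j, k, by omega, h2, h3, h4, h5, h6⟩
  | case2 l hlr hl ih =>
    intro hr
    rw [ih (by omega)]
    constructor
    · rintro ⟨j, k, h1, h2, h3, h4, h5, h6⟩; exact ⟨j, k, h1, h2, by omega, h4, h5, h6⟩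
    · rintro ⟨j, k, h1, h2, h3, h4, h5, h6⟩; exact ⟨j, k, h1, h2, by omega, h4, h5, h6⟩
  | case3 l r hlr hl hr' hgt ih =>
    intro hr
    rw [ih (by omega)]
    constructor
    · rintro ⟨j, k, h1, h2, h3, h4, h5, h6⟩; exact ⟨j, k, h1, h2, by omega, h4, h5, h6⟩
    · rintro ⟨j, k, h1, h2, h3, h4, h5, h6⟩
      refine ⟨j, k, h1, h2, ?_, h4, h5, h6⟩
      rcases Nat.lt_or_ge k r with h | h
      · omega
      · have hkr : k = r := by omega
        subst hkr
        have := mono l j h1 (by omega)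
        omega
  | case4 l r hlr hl hr' hgt hlt ih =>
    intro hr
    rw [ih hr]
    constructor
    · rintro ⟨j, k, h1, h2, h3, h4, h5, h6⟩; exact ⟨j, k, by omega, h2, h3, h4, h5, h6⟩
    · rintro ⟨j, k, h1, h2, h3, h4, h5, h6⟩
      refine ⟨j, k, ?_, h2, h3, h4, h5, h6⟩
      rcases Nat.lt_or_ge l j with h | h
      · omega
      · have hjl : j = l := by omega
        subst hjl
        have := mono k r h3 hr
        omega
  | case5 l r hlr hl hr' hgt hlt =>
    intro hr
    simp only [true_iff]
    exact ⟨l, r, le_refl _, hlr, le_refl _, hl, hr', by omega⟩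
  | case6 l r hlr =>
    intro hr
    simp only [Bool.false_eq_true, false_iff]
    rintro ⟨j, k, h1, h2, h3, _, _, _⟩
    omega

lemma bInner_iff (S : List Int) (cnt : PySem.Dict Int Int) (i : Nat)
    (hcnt : ∀ x, cnt.getD x 0 = (S.count x : Int)) (hi : i < S.length) (j : Nat) :
    (bInner S cnt i (S.getD i 0) j S.length = true ↔
      ∃ j' : Nat, j ≤ j' ∧ j' < S.length ∧ j' ≠ i ∧
        ∃ k : Nat, k < S.length ∧ k ≠ i ∧ k ≠ j' ∧
          S.getD j' 0 + S.getD k 0 = S.getD i 0) := by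
  fun_induction bInner S cnt i (S.getD i 0) j S.length with
  | case1 hlt ih =>
    rw [ih]
    constructor
    · rintro ⟨j', h1, h2, h3, hk⟩; exact ⟨j', by omega, h2, h3, hk⟩
    · rintro ⟨j', h1, h2, h3, hk⟩; exact ⟨j', by omega, h2, h3, hk⟩
  | case2 j hlt hne need avail havail =>
    simp only [avail, need, hcnt, dite_eq_ite] at havail
    simp only [true_iff]
    obtain ⟨k, hk1, hk2, hk3, hk4⟩ :=
      (avail_iff S (S.getD i 0 - S.getD j 0) i j hi hlt hne).mp havail
    exact ⟨j, le_refl _, hlt, hne, k, hk1, hk2, hk3, by omega⟩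
  | case3 j hlt hne need avail havail ih =>
    rw [ih]
    simp only [avail, need, hcnt, dite_eq_ite] at havail
    constructor
    · rintro ⟨j', h1, h2, h3, hk⟩; exact ⟨j', by omega, h2, h3, hk⟩
    · rintro ⟨j', h1, h2, h3, k, hk1, hk2, hk3, hk4⟩
      refine ⟨j', ?_, h2, h3, k, hk1, hk2, hk3, hk4⟩
      rcases Nat.lt_or_ge j j' with h | h
      · omega
      · have : j' = j := by omega
        subst this
        exfalso
        apply havail
        rw [(avail_iff S (S.getD i 0 - S.getD j' 0) i j' hi h2 h3)]
        exact ⟨k, hk1, hk2, hk3, by omega⟩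
  | case4 j hlt =>
    simp only [Bool.false_eq_true, false_iff]
    rintro ⟨j', h1, h2, _⟩
    omega

lemma inner_pairEx (S : List Int) (i : Nat) :
    (∃ j' : Nat, 0 ≤ j' ∧ j' < S.length ∧ j' ≠ i ∧
       ∃ k : Nat, k < S.length ∧ k ≠ i ∧ k ≠ j' ∧
         S.getD j' 0 + S.getD k 0 = S.getD i 0) ↔ pairEx S i := by
  constructor
  · rintro ⟨j, -, hj, hji, k, hk, hki, hkj, hsum⟩
    rcases Nat.lt_or_ge j k with h | h
    · exact ⟨j, k, h, hk, hji, hki, hsum⟩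
    · exact ⟨k, j, by omega, hj, hki, hji, by omega⟩
  · rintro ⟨j, k, hjk, hk, hji, hki, hsum⟩
    exact ⟨j, Nat.zero_le _, by omega, hji, k, hk, hki, by omega, hsum⟩

lemma checkLoopA_iff (S : List Int) (n : Nat) : ∀ i : Nat,
    (checkLoopA S i n = true ↔
      ∀ m : Nat, i ≤ m → m < n → S.getD m 0 ≠ S.getD (m-1) 0 → is_sum_of_two S m = true) := by
  intro i
  fun_induction checkLoopA S i n with
  | case1 i hlt hcond =>
    simp only [Bool.false_eq_true, false_iff]
    intro h
    exact hcond.2 (h i (le_refl _) hlt hcond.1)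
  | case2 i hlt hcond ih =>
    rw [ih]
    have hcond' : S.getD i 0 ≠ S.getD (i-1) 0 → is_sum_of_two S i = true := by
      intro hne
      by_contra hns
      exact hcond ⟨hne, hns⟩
    constructor
    · intro h m h1 h2 h3
      rcases Nat.eq_or_lt_of_le h1 with rfl | h1'
      · exact hcond' h3
      · exact h m (by omega) h2 h3
    · intro h m h1 h2 h3
      exact h m (by omega) h2 h3
  | case3 i hlt =>
    simp only [true_iff]
    intro m h1 h2
    omega

lemma bOuter_iff (S : List Int) (cnt : PySem.Dict Int Int) (n : Nat) : ∀ i : Nat,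
    (bOuter S cnt i n = true ↔
      ∀ m : Nat, i ≤ m → m < n → ¬ (0 < m ∧ S.getD m 0 = S.getD (m-1) 0) →
        bInner S cnt m (S.getD m 0) 0 n = true) := by
  intro i
  fun_induction bOuter S cnt i n with
  | case1 i hlt hdup ih =>
    rw [ih]
    constructor
    · intro h m h1 h2 h3
      rcases Nat.eq_or_lt_of_le h1 with rfl | h1'
      · exact absurd hdup h3
      · exact h m (by omega) h2 h3
    · intro h m h1 h2 h3
      exact h m (by omega) h2 h3
  | case2 i hlt hdup hin ih =>
    rw [ih]
    constructor
    · intro h m h1 h2 h3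
      rcases Nat.eq_or_lt_of_le h1 with rfl | h1'
      · exact hin
      · exact h m (by omega) h2 h3
    · intro h m h1 h2 h3
      exact h m (by omega) h2 h3
  | case3 i hlt hdup hin =>
    simp only [Bool.false_eq_true, false_iff]
    intro h
    exact absurd (h i (le_refl _) hlt hdup) (by simpa using hin)
  | case4 i hlt =>
    simp only [true_iff]
    intro m h1 h2
    omega

-- ===== VERDICT (by name: the statement is the Claim_ definition above) =====
theorem check_sums_spec : Claim_equal_check_sums := by
  intro A _
  unfold Spec_check_sums check_sums check_sums_alt
  by_cases hlen : A.length < 3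
  · simp [hlen]
  · rw [if_neg hlen, if_neg hlen]
    simp only []
    set S := PySem.List.sorted A (fun x => x) false with hS
    set cnt : PySem.Dict Int Int := List.foldl (fun d x => d.insert x (d.getD x 0 + 1)) PySem.Dict.empty S with hcntdef
    have hlenS : S.length = A.length := PySem.List.length_sorted A (fun x => x) false
    have hmono := getD_mono S (PySem.List.sorted_pairwise A (fun x => x))
    have hcnt : ∀ x, cnt.getD x 0 = (S.count x : Int) := by
      intro x
      rw [hcntdef, PySem.Dict.foldl_insert_getD_add_one_eq_counter, PySem.Dict.getD_counter]
    have hsum : ∀ m : Nat, (is_sum_of_two S m = true ↔ pairEx S m) := by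
      intro m
      unfold is_sum_of_two
      rw [aux_iff S hmono m 0 (S.length - 1) (by omega)]
      constructor
      · rintro ⟨j, k, h1, h2, h3, h4, h5, h6⟩
        exact ⟨j, k, h2, by omega, h4, h5, h6⟩
      · rintro ⟨j, k, h1, h2, h3, h4, h5⟩
        exact ⟨j, k, Nat.zero_le _, h1, by omega, h3, h4, h5⟩
    have hinner : ∀ m : Nat, m < S.length →
        (bInner S cnt m (S.getD m 0) 0 S.length = true ↔ pairEx S m) := by
      intro m hm
      exact (bInner_iff S cnt m hcnt hm 0).trans (inner_pairEx S m)
    have hA_iff : ((if ¬ is_sum_of_two S 0 = true then false else checkLoopA S 1 A.length) = true) ↔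
        (pairEx S 0 ∧ ∀ m, 1 ≤ m → m < A.length → S.getD m 0 ≠ S.getD (m-1) 0 → pairEx S m) := by
      by_cases h0 : is_sum_of_two S 0 = true
      · rw [if_neg (by simpa using h0), checkLoopA_iff]
        constructor
        · intro h
          exact ⟨(hsum 0).mp h0, fun m h1 h2 h3 => (hsum m).mp (h m h1 h2 h3)⟩
        · intro h m h1 h2 h3
          exact (hsum m).mpr (h.2 m h1 h2 h3)
      · rw [if_pos (by simpa using h0)]
        simp only [Bool.false_eq_true, false_iff]
        rintro ⟨hp, -⟩
        exact h0 ((hsum 0).mpr hp)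
    have hB_iff : (bOuter S cnt 0 S.length = true) ↔
        (∀ m, m < S.length → ¬ (0 < m ∧ S.getD m 0 = S.getD (m-1) 0) → pairEx S m) := by
      rw [bOuter_iff]
      constructor
      · intro h m h2 h3
        exact (hinner m h2).mp (h m (Nat.zero_le _) h2 h3)
      · intro h m _ h2 h3
        exact (hinner m h2).mpr (h m h2 h3)
    rw [Bool.eq_iff_iff, hA_iff, hB_iff, hlenS]
    constructor
    · rintro ⟨h0, h⟩ m hm hg
      by_cases hm0 : m = 0
      · subst hm0; exact h0
      · refine h m (by omega) hm ?_
        intro heq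
        exact hg ⟨by omega, heq⟩
    · intro h
      refine ⟨h 0 (by omega) (by rintro ⟨h', -⟩; omega), ?_⟩
      intro m h1 h2 h3
      exact h m h2 (by rintro ⟨-, heq⟩; exact h3 heq)
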